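-- pv_equiv track=rewrite | github.com/ismaeljda/travel_planner | services/hotel_service.py | _categorize_hotel
-- ===== SOURCE A (Python) =====
-- def _categorize_hotel(hotel_data):
--     """Categorize hotel type based on data"""
--     name = hotel_data.get('name', '').lower()
--
--     if any(word in name for word in ['hostel', 'auberge', 'backpack']):
--         return 'Hostel'
--     elif any(word in name for word in ['resort', 'spa']):
--         return 'Resort'
--     elif any(word in name for word in ['apartment', 'appart', 'residence']):
--         return 'Apartment'
--     elif any(word in name for word in ['boutique', 'design']):
--         return 'Boutique Hotel'
--     else:
--         return 'Hotel'
-- ===== SOURCE B (Python) =====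
-- # B: flat keyword->rank map; one accumulator pass minimizing the rank of any
-- # matching keyword, then index into the label table. No precedence branch chain.
-- _KEYWORD_RANK = {
--     'hostel': 0, 'auberge': 0, 'backpack': 0,
--     'resort': 1, 'spa': 1,
--     'apartment': 2, 'appart': 2, 'residence': 2,
--     'boutique': 3, 'design': 3,
-- }
-- _LABELS = ['Hostel', 'Resort', 'Apartment', 'Boutique Hotel', 'Hotel']
--
-- def _categorize_hotel(hotel_data):
--     name = hotel_data.get('name', '').lower()
--     best = 4
--     for word, rank in _KEYWORD_RANK.items():
--         if rank < best and word in name: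
--             best = rank
--     return _LABELS[best]
-- ===== Notes on version B (the rewrite author's own statement) =====
-- stated objective: alternative
-- what changed: Replaced the ordered if/elif precedence chain with a flat keyword-to-rank map and a single min-reduction pass (accumulator holds the smallest rank of any matching keyword), then one table lookup for the label.
import Mathlib
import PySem

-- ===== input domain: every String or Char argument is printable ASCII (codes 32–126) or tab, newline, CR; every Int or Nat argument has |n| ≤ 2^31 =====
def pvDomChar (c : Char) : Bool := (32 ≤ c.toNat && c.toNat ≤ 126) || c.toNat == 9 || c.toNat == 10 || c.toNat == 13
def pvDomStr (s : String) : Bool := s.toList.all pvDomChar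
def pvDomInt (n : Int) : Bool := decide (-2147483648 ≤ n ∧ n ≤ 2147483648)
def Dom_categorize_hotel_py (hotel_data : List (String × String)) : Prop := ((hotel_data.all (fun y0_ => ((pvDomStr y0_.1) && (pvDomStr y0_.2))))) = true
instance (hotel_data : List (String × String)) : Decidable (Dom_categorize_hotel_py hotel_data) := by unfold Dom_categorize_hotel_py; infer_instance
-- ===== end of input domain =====

-- B replaces A's if/elif precedence chain with a flat keyword->rank map, a single
-- min-reduction pass over it, and one label-table lookup (alternative decomposition; same cost).


-- ===== PORT A =====
def categorize_hotel_py (hotel_data : List (String × String)) : String :=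
  let name := PySem.Str.lower (PySem.Dict.getD (PySem.Dict.ofList hotel_data) "name" "")
  if ["hostel", "auberge", "backpack"].any (fun word => PySem.Str.isIn word name) then "Hostel"
  else if ["resort", "spa"].any (fun word => PySem.Str.isIn word name) then "Resort"
  else if ["apartment", "appart", "residence"].any (fun word => PySem.Str.isIn word name) then "Apartment"
  else if ["boutique", "design"].any (fun word => PySem.Str.isIn word name) then "Boutique Hotel"
  else "Hotel"

-- ===== PORT B =====
-- the keyword -> rank dict, in Python insertion order
def pvKeywordRank : List (String × Nat) :=
  [("hostel", 0), ("auberge", 0), ("backpack", 0),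
   ("resort", 1), ("spa", 1),
   ("apartment", 2), ("appart", 2), ("residence", 2),
   ("boutique", 3), ("design", 3)]

def pvLabels : List String := ["Hostel", "Resort", "Apartment", "Boutique Hotel", "Hotel"]

def categorize_hotel_py_alt (hotel_data : List (String × String)) : String :=
  let name := PySem.Str.lower (PySem.Dict.getD (PySem.Dict.ofList hotel_data) "name" "")
  let best := pvKeywordRank.foldl
    (fun best wr => if wr.2 < best && PySem.Str.isIn wr.1 name then wr.2 else best) 4
  -- _LABELS[best]: best is always in 0..4, so plain list indexing is exact here
  pvLabels.getD best "Hotel"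

-- ===== PRECONDITION & SPEC =====
def Spec_categorize_hotel_py (hotel_data : List (String × String)) (out : String) : Prop := out = categorize_hotel_py_alt hotel_data
instance (hotel_data : List (String × String)) (out : String) : Decidable (Spec_categorize_hotel_py hotel_data out) := by unfold Spec_categorize_hotel_py; infer_instance

-- ===== CLAIM (what is proved, stated in full; the proofs are below) =====
def Claim_equal_categorize_hotel_py : Prop := ∀ (hotel_data : List (String × String)), Dom_categorize_hotel_py hotel_data → Spec_categorize_hotel_py hotel_data (categorize_hotel_py hotel_data)

-- ===== LEMMAS AND PROOFS =====
-- abstract bool version of "A's branch chain = B's min-rank fold + lookup", 1024 cases by decide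
theorem pvChainBool : ∀ (b1 b2 b3 b4 b5 b6 b7 b8 b9 b10 : Bool),
    (if b1 || (b2 || (b3 || false)) then "Hostel"
     else if b4 || (b5 || false) then "Resort"
     else if b6 || (b7 || (b8 || false)) then "Apartment"
     else if b9 || (b10 || false) then "Boutique Hotel"
     else "Hotel")
    = pvLabels.getD
        (([((0:Nat),b1),(0,b2),(0,b3),(1,b4),(1,b5),(2,b6),(2,b7),(2,b8),(3,b9),(3,b10)]).foldl
          (fun best rb => if rb.1 < best && rb.2 then rb.1 else best) 4) "Hotel" := by decide

-- instantiate at the ten membership tests; both sides are definitionally the ports' bodies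
theorem pvChain_eq_minrank (name : String) :
    (if ["hostel", "auberge", "backpack"].any (fun word => PySem.Str.isIn word name) then "Hostel"
     else if ["resort", "spa"].any (fun word => PySem.Str.isIn word name) then "Resort"
     else if ["apartment", "appart", "residence"].any (fun word => PySem.Str.isIn word name) then "Apartment"
     else if ["boutique", "design"].any (fun word => PySem.Str.isIn word name) then "Boutique Hotel"
     else "Hotel")
    = pvLabels.getD (pvKeywordRank.foldl
        (fun best wr => if wr.2 < best && PySem.Str.isIn wr.1 name then wr.2 else best) 4) "Hotel" :=
  pvChainBool (PySem.Str.isIn "hostel" name) (PySem.Str.isIn "auberge" name)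
    (PySem.Str.isIn "backpack" name) (PySem.Str.isIn "resort" name) (PySem.Str.isIn "spa" name)
    (PySem.Str.isIn "apartment" name) (PySem.Str.isIn "appart" name)
    (PySem.Str.isIn "residence" name) (PySem.Str.isIn "boutique" name)
    (PySem.Str.isIn "design" name)

-- ===== VERDICT (by name: the statement is the Claim_ definition above) =====
theorem categorize_hotel_py_spec : Claim_equal_categorize_hotel_py := by
  intro hotel_data _
  exact pvChain_eq_minrank _
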